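-- pv_equiv track=rewrite | github.com/Ankowa/inz | laion-mi/query_knn_index.py | get_split_indices
-- ===== SOURCE A (Python) =====
-- from typing import Tuple, List, Union
--
-- def get_split_indices(arr: list, num_splits: int) -> List[List[int]]:
--     indices = []
--     multi = len(arr) // num_splits
--     lb = 0
--     rb = -1
--     r = 1
--     while r < num_splits:
--         rb = r * multi
--         indices.append([lb, rb])
--         lb = rb
--         r += 1
--     indices.append([lb, -1])
--     return indices
-- ===== SOURCE B (Python) =====
-- def get_split_indices(arr: list, num_splits: int):
--     multi = len(arr) // num_splits
--     n = max(num_splits, 1)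
--
--     def pairs(lo, hi):
--         # boundary pairs for chunk indices [lo, hi), divide and conquer
--         if hi - lo == 1:
--             return [[lo * multi, -1 if hi == n else hi * multi]]
--         mid = (lo + hi) // 2
--         return pairs(lo, mid) + pairs(mid, hi)
--
--     return pairs(0, n)
-- ===== Notes on version B (the rewrite author's own statement) =====
-- stated objective: alternative
-- what changed: Replaces A's sequential lb/rb accumulator while-loop with a recursive divide-and-conquer over the chunk-index interval [0, n): the interval is split at its midpoint and the two halves' boundary-pair lists are concatenated, each leaf computing its pair [lo*multi, hi*multi] (or -1 at the last chunk) directly from the chunk index.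
import Mathlib
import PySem

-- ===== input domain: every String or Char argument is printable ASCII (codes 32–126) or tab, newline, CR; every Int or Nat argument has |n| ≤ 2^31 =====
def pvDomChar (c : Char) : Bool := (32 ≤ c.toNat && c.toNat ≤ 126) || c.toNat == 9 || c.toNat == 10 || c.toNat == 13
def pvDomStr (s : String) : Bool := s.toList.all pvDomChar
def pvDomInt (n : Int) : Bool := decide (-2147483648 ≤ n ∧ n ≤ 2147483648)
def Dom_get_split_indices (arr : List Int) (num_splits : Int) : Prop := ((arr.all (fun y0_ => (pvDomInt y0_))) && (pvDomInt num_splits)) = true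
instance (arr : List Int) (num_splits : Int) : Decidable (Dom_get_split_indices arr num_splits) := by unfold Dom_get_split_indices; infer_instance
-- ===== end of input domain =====

-- B replaces A's sequential lb/rb accumulator loop with a divide-and-conquer recursion
-- over the chunk-index interval, each leaf computing its pair from the chunk index
-- (objective: alternative, same asymptotic cost).

-- ===== PORT A =====
-- the 'while r < num_splits' loop of A, state (lb, r), appending to acc
def gsiLoop (multi num_splits lb r : Int) (acc : List (List Int)) : List (List Int) :=
  if _h : r < num_splits then
    gsiLoop multi num_splits (r * multi) (r + 1) (acc ++ [[lb, r * multi]])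
  else
    acc ++ [[lb, -1]]
termination_by (num_splits - r).toNat
decreasing_by omega

def get_split_indices (arr : List Int) (num_splits : Int) : List (List Int) :=
  let multi := PySem.Int.floordiv (arr.length : Int) num_splits
  gsiLoop multi num_splits 0 1 []

-- ===== PORT B =====
-- Source B's recursive helper 'pairs(lo, hi)'. Python tests 'hi - lo == 1'; the port's
-- guard 'hi - lo ≤ 1' only makes the recursion total (Source B always calls it with
-- lo < hi, where the two conditions agree).
def gsiPairs (multi n lo hi : Int) : List (List Int) :=
  if hi - lo ≤ 1 then
    [[lo * multi, if hi = n then -1 else hi * multi]]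
  else
    let mid := PySem.Int.floordiv (lo + hi) 2
    gsiPairs multi n lo mid ++ gsiPairs multi n mid hi
termination_by (hi - lo).toNat
decreasing_by
  · have h2 : (lo + hi).fdiv 2 = (lo + hi) / 2 := by simp [Int.fdiv_eq_ediv]
    simp only [PySem.Int.floordiv]
    omega
  · have h2 : (lo + hi).fdiv 2 = (lo + hi) / 2 := by simp [Int.fdiv_eq_ediv]
    simp only [PySem.Int.floordiv]
    omega

def get_split_indices_alt (arr : List Int) (num_splits : Int) : List (List Int) :=
  let multi := PySem.Int.floordiv (arr.length : Int) num_splits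
  let n := max num_splits 1
  gsiPairs multi n 0 n

-- ===== PRECONDITION & SPEC =====
-- Pre_ excludes exactly num_splits = 0, where the Python A raises ZeroDivisionError.
def Pre_get_split_indices (arr : List Int) (num_splits : Int) : Prop := num_splits ≠ 0
instance (arr : List Int) (num_splits : Int) : Decidable (Pre_get_split_indices arr num_splits) := by unfold Pre_get_split_indices; infer_instance
def pvWitness_get_split_indices : List Int × Int := ([1, 2, 3, 4], 2)

def Spec_get_split_indices (arr : List Int) (num_splits : Int) (out : List (List Int)) : Prop := out = get_split_indices_alt arr num_splits
instance (arr : List Int) (num_splits : Int) (out : List (List Int)) : Decidable (Spec_get_split_indices arr num_splits out) := by unfold Spec_get_split_indices; infer_instance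

-- ===== CLAIM (what is proved, stated in full; the proofs are below) =====
def Claim_equal_get_split_indices : Prop := ∀ (arr : List Int) (num_splits : Int), Dom_get_split_indices arr num_splits → Pre_get_split_indices arr num_splits → Spec_get_split_indices arr num_splits (get_split_indices arr num_splits)

-- ===== LEMMAS AND PROOFS =====

-- the pair produced for chunk index i
def gsiPair (multi n i : Int) : List Int :=
  [i * multi, if i + 1 = n then -1 else (i + 1) * multi]

-- B's recursion yields one pair per chunk index of its interval
theorem gsiPairs_eq_map (multi n : Int) :
    ∀ (k : Nat) (lo hi : Int), (hi - lo).toNat = k → lo < hi →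
      gsiPairs multi n lo hi = (PySem.List.pyRange lo hi 1).map (gsiPair multi n) := by
  intro k
  induction k using Nat.strong_induction_on with
  | _ k ih =>
    intro lo hi hk hlt
    by_cases h1 : hi - lo ≤ 1
    · have hhi : hi = lo + 1 := by omega
      rw [gsiPairs, if_pos h1, hhi, PySem.List.pyRange_one_cons (by omega),
        PySem.List.pyRange_one_eq_nil (by omega)]
      simp [gsiPair]
    · have hmid : (lo + hi).fdiv 2 = (lo + hi) / 2 := by simp [Int.fdiv_eq_ediv]
      rw [gsiPairs, if_neg h1]
      simp only [PySem.Int.floordiv]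
      have hlo : lo < (lo + hi).fdiv 2 := by omega
      have hhi : (lo + hi).fdiv 2 < hi := by omega
      rw [ih ((lo + hi).fdiv 2 - lo).toNat (by omega) lo _ rfl hlo,
        ih (hi - (lo + hi).fdiv 2).toNat (by omega) _ hi rfl hhi,
        ← List.map_append,
        ← PySem.List.pyRange_one_append lo ((lo + hi).fdiv 2) hi (by omega) (by omega)]

-- common normal form: successive boundary pairs of lb :: bs, closed with -1
def gsiChain (lb : Int) (bs : List Int) : List (List Int) :=
  match bs with
  | [] => [[lb, -1]]
  | b :: t => [lb, b] :: gsiChain b t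

theorem gsiLoop_eq_chain (multi num_splits : Int) :
    ∀ (n : Nat) (r lb : Int) (acc : List (List Int)), (num_splits - r).toNat = n →
      gsiLoop multi num_splits lb r acc
        = acc ++ gsiChain lb ((PySem.List.pyRange r num_splits 1).map (fun x => x * multi)) := by
  intro n
  induction n with
  | zero =>
    intro r lb acc hn
    have hge : ¬ r < num_splits := by omega
    rw [gsiLoop, dif_neg hge, PySem.List.pyRange_one_eq_nil (by omega)]
    rfl
  | succ n ih =>
    intro r lb acc hn
    by_cases hlt : r < num_splits
    · rw [gsiLoop, dif_pos hlt, PySem.List.pyRange_one_cons hlt,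
        ih (r + 1) (r * multi) (acc ++ [[lb, r * multi]]) (by omega)]
      simp [gsiChain]
    · rw [gsiLoop, dif_neg hlt, PySem.List.pyRange_one_eq_nil (by omega)]
      rfl

-- the per-index pair map over [lo, n) is the lb-chain of the boundaries after lo
theorem map_pair_eq_chain (multi n : Int) :
    ∀ (k : Nat) (lo : Int), (n - lo).toNat = k → lo < n →
      (PySem.List.pyRange lo n 1).map (gsiPair multi n)
        = gsiChain (lo * multi) ((PySem.List.pyRange (lo + 1) n 1).map (fun x => x * multi)) := by
  intro k
  induction k with
  | zero => intro lo hk hlt; omega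
  | succ k ih =>
    intro lo hk hlt
    rw [PySem.List.pyRange_one_cons hlt]
    by_cases hend : lo + 1 = n
    · rw [PySem.List.pyRange_one_eq_nil (by omega)]
      simp [gsiPair, gsiChain, hend]
    · simp only [List.map_cons]
      rw [ih (lo + 1) (by omega) (by omega), PySem.List.pyRange_one_cons (show lo + 1 < n by omega)]
      simp [gsiPair, gsiChain, hend]

-- ===== VERDICT (by name: the statement is the Claim_ definition above) =====
theorem get_split_indices_spec : Claim_equal_get_split_indices := by
  intro arr num_splits _ _
  unfold Spec_get_split_indices get_split_indices get_split_indices_alt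
  rw [gsiLoop_eq_chain _ _ _ 1 0 [] rfl,
    gsiPairs_eq_map _ _ (max num_splits 1 - 0).toNat 0 _ rfl (by omega),
    map_pair_eq_chain _ _ (max num_splits 1 - 0).toNat 0 rfl (by omega)]
  by_cases h : 1 ≤ num_splits
  · simp [max_eq_left h, List.nil_append]
  · rw [PySem.List.pyRange_one_eq_nil (b := num_splits) (by omega),
      PySem.List.pyRange_one_eq_nil (by omega)]
    simp
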